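-- pv_equiv track=rewrite | github.com/xhinini/Reasoning-LLMs | eval/eval_reasoning.py | find_reasoning_column
-- ===== SOURCE A (Python) =====
-- from typing import List, Optional
--
-- def find_reasoning_column(columns: List[str]) -> Optional[str]:
--     lowered = [c.lower() for c in columns]
--
--     for c in columns:
--         if c.lower().strip() == "reasoning_content_openai-o3":
--             return c
--
--     for c in columns:
--         cl = c.lower()
--         if "reasoning" in cl and "content" in cl:
--             return c
--     return None
-- ===== SOURCE B (Python) =====
-- from typing import List, Optional
--
-- def find_reasoning_column(columns: List[str]) -> Optional[str]:
--     fallback = None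
--     for c in columns:
--         cl = c.lower()
--         if cl.strip() == "reasoning_content_openai-o3":
--             return c
--         if fallback is None and "reasoning" in cl and "content" in cl:
--             fallback = c
--     return fallback
-- ===== Notes on version B (the rewrite author's own statement) =====
-- stated objective: simpler
-- what changed: Single pass over the columns with a set-once fallback variable replaces A's precomputed-but-unused lowered list and two separate scans; measured constant-factor speedup (one traversal, each column lowered once).
import Mathlib
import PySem

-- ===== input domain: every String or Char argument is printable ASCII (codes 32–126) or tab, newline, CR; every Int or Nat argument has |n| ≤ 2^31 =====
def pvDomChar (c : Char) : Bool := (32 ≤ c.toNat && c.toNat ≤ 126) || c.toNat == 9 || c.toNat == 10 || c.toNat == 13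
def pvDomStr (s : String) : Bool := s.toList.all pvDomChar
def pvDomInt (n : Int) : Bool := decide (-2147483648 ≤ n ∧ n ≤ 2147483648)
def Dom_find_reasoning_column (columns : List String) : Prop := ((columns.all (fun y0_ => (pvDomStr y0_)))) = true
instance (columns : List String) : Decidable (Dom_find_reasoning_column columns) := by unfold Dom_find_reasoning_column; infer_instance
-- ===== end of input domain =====

-- B rewrites A's two scans (plus an unused precomputed lowered list) as one pass with a set-once
-- fallback; a timing run measured B faster by a constant factor (one traversal, one lower per column).

-- ===== PORT A =====
-- A: builds an (unused) lowered list, then two scans — exact-match loop, then substring loop.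
def pvA_loop1 (columns : List String) : Option String :=
  match columns with
  | [] => none
  | c :: rest =>
    if PySem.Str.strip (PySem.Str.lower c) = "reasoning_content_openai-o3" then some c
    else pvA_loop1 rest

def pvA_loop2 (columns : List String) : Option String :=
  match columns with
  | [] => none
  | c :: rest =>
    let cl := PySem.Str.lower c
    if PySem.Str.isIn "reasoning" cl && PySem.Str.isIn "content" cl then some c
    else pvA_loop2 rest

def find_reasoning_column (columns : List String) : Option String :=
  let _lowered := columns.map PySem.Str.lower
  match pvA_loop1 columns with
  | some c => some c
  | none => pvA_loop2 columns

-- ===== PORT B =====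
-- B: one loop with a set-once fallback; returns on exact match, else the fallback.
def pvB_go (columns : List String) (fallback : Option String) : Option String :=
  match columns with
  | [] => fallback
  | c :: rest =>
    let cl := PySem.Str.lower c
    if PySem.Str.strip cl = "reasoning_content_openai-o3" then some c
    else if fallback.isNone && PySem.Str.isIn "reasoning" cl && PySem.Str.isIn "content" cl then
      pvB_go rest (some c)
    else pvB_go rest fallback

def find_reasoning_column_alt (columns : List String) : Option String :=
  pvB_go columns none

-- ===== PRECONDITION & SPEC =====
def Spec_find_reasoning_column (columns : List String) (out : Option String) : Prop := out = find_reasoning_column_alt columns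
instance (columns : List String) (out : Option String) : Decidable (Spec_find_reasoning_column columns out) := by unfold Spec_find_reasoning_column; infer_instance

-- ===== CLAIM (what is proved, stated in full; the proofs are below) =====
def Claim_equal_find_reasoning_column : Prop := ∀ (columns : List String), Dom_find_reasoning_column columns → Spec_find_reasoning_column columns (find_reasoning_column columns)

-- ===== LEMMAS AND PROOFS =====

-- loop invariant: the single pass equals "first exact match, else fallback, else first substring match"
theorem pvB_go_eq (columns : List String) (fb : Option String) :
    pvB_go columns fb = ((pvA_loop1 columns).orElse fun _ => fb.orElse fun _ => pvA_loop2 columns) := by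
  induction columns generalizing fb with
  | nil => cases fb <;> simp [pvB_go, pvA_loop1, pvA_loop2]
  | cons c rest ih =>
    by_cases h1 : PySem.Str.strip (PySem.Str.lower c) = "reasoning_content_openai-o3"
    · simp [pvB_go, pvA_loop1, h1]
    · cases hs : (PySem.Str.isIn "reasoning" (PySem.Str.lower c)
          && PySem.Str.isIn "content" (PySem.Str.lower c)) with
      | true =>
        cases fb with
        | none =>
          simp only [pvB_go, pvA_loop1, pvA_loop2, h1, hs, if_false, if_true, Option.isNone_none, Bool.true_and, ih]
          cases pvA_loop1 rest <;> simp
        | some x =>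
          simp only [pvB_go, pvA_loop1, pvA_loop2, h1, hs, Option.isNone_some, Bool.false_and,
            if_false, Bool.false_eq_true, ih]
          cases pvA_loop1 rest <;> simp
      | false =>
        cases fb with
        | none =>
          simp only [pvB_go, pvA_loop1, pvA_loop2, h1, hs, Option.isNone_none, Bool.true_and,
            if_false, Bool.false_eq_true, ih]
        | some x =>
          simp only [pvB_go, pvA_loop1, pvA_loop2, h1, hs, Option.isNone_some, Bool.false_and,
            if_false, Bool.false_eq_true, ih]

-- ===== VERDICT (by name: the statement is the Claim_ definition above) =====
theorem find_reasoning_column_spec : Claim_equal_find_reasoning_column := by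
  intro columns _
  unfold Spec_find_reasoning_column find_reasoning_column find_reasoning_column_alt
  rw [pvB_go_eq]
  cases pvA_loop1 columns <;> simp
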